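-- pv_equiv track=rewrite | github.com/ShayMorad/Intro-to-CS | Exercise 08/puzzle_solver.py | _directions_max_seen_cell
-- ===== SOURCE A (Python) =====
-- from typing import List, Tuple, Set, Optional
--
-- Picture = List[List[int]]
--
-- def _directions_max_seen_cell(picture: Picture, row: int, col: int, direction: str, sum: int) -> int:
--     """
--     This function count the cells in the direction from the current cell that was input.
--     """
--     if row > len(picture) - 1 or row < 0:
--         return sum
--     if col > len(picture[0]) - 1 or col < 0:
--         return sum
--     cell = picture[row][col]
--     if cell == 0:
--         return sum
--     sum += 1
--     if direction == "up":
--         return _directions_max_seen_cell(picture, row - 1, col, "up", sum)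
--     elif direction == "down":
--         return _directions_max_seen_cell(picture, row + 1, col, "down", sum)
--     elif direction == "left":
--         return _directions_max_seen_cell(picture, row, col - 1, "left", sum)
--     elif direction == "right":
--         return _directions_max_seen_cell(picture, row, col + 1, "right", sum)
-- ===== SOURCE B (Python) =====
-- _DELTAS = {"up": (-1, 0), "down": (1, 0), "left": (0, -1), "right": (0, 1)}
--
--
-- def _directions_max_seen_cell(picture, row, col, direction, sum):
--     count = sum
--     while 0 <= row < len(picture) and 0 <= col < len(picture[0]):
--         if picture[row][col] == 0:
--             return count
--         count += 1
--         delta = _DELTAS.get(direction)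
--         if delta is None:
--             return None
--         row += delta[0]
--         col += delta[1]
--     return count
-- ===== Notes on version B (the rewrite author's own statement) =====
-- stated objective: idiomatic
-- what changed: Replaced the linear tail recursion with an explicit iterative while-loop walk driven by a direction->delta table, keeping the exact bounds/zero/invalid-direction semantics.
-- outside the precondition, e.g. on _directions_max_seen_cell([[1, 2], [3, 0], [5]], 0, 1, 'down', 0): A returns 1, B returns 1; on _directions_max_seen_cell([[9, 9, 9], [1, 0]], 1, 0, 'right', 0): A returns 1, B returns 1
import Mathlib
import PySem

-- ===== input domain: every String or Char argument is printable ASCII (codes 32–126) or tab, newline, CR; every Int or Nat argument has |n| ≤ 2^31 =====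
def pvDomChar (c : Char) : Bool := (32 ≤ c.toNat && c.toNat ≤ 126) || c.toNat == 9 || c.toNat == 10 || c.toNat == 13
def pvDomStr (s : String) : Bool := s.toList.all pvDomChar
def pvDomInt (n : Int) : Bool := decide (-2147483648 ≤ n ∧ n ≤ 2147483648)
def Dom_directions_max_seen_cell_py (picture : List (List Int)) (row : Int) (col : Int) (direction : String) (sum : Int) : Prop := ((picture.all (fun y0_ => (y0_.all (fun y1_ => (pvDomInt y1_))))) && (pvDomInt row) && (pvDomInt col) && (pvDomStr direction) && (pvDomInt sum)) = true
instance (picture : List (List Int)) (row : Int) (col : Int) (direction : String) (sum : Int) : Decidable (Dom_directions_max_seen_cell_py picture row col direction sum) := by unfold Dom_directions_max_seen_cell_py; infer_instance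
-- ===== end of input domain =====

-- B replaces A's linear tail recursion by an iterative delta-table walk (objective: idiomatic);
-- return-value equivalence is proved on Pre_, which excludes the inputs where Python A raises
-- IndexError (ragged picture reached by the walk) or returns None (unknown direction at a
-- non-zero in-bounds cell).

-- measure used only for termination of both walks (number of steps left in the walk direction) (number of steps left in the walk's direction)
def pvMeasure (picture : List (List Int)) (direction : String) (row col : Int) : Nat :=
  if direction = "up" then (row + 1).toNat
  else if direction = "down" then ((picture.length : Int) - row).toNat
  else if direction = "left" then (col + 1).toNat
  else (((picture.headD []).length : Int) - col).toNat

-- ===== PORT A =====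
def directions_max_seen_cell_py (picture : List (List Int)) (row : Int) (col : Int) (direction : String) (sum : Int) : Int :=
  if row > (picture.length : Int) - 1 ∨ row < 0 then sum
  else if col > ((picture.headD []).length : Int) - 1 ∨ col < 0 then sum
  else
    -- picture[row][col]; Pre_ guarantees the access is in range, so getD is never semantically consulted inside Pre_
    let cell := ((PySem.List.pyGet? ((PySem.List.pyGet? picture row).getD []) col).getD 0)
    if cell = 0 then sum
    else
      let sum := sum + 1
      if direction = "up" then directions_max_seen_cell_py picture (row - 1) col "up" sum
      else if direction = "down" then directions_max_seen_cell_py picture (row + 1) col "down" sum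
      else if direction = "left" then directions_max_seen_cell_py picture row (col - 1) "left" sum
      else if direction = "right" then directions_max_seen_cell_py picture row (col + 1) "right" sum
      else 0  -- Python falls off the function and returns None here; excluded by Pre_
termination_by pvMeasure picture direction row col
decreasing_by
  all_goals simp_all [pvMeasure]

-- ===== PORT B =====
def pvDeltas : PySem.Dict String (Int × Int) :=
  PySem.Dict.mk [("up", (-1, 0)), ("down", (1, 0)), ("left", (0, -1)), ("right", (0, 1))]

-- case analysis on a successful delta lookup; cited by pvAltLoop's decreasing_by
lemma pvDeltas_cases (direction : String) (d : Int × Int) (h : pvDeltas.get? direction = some d) :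
    (direction = "up" ∧ d = (-1, 0)) ∨ (direction = "down" ∧ d = (1, 0)) ∨
    (direction = "left" ∧ d = (0, -1)) ∨ (direction = "right" ∧ d = (0, 1)) := by
  simp [pvDeltas, PySem.Dict.get?] at h
  obtain ⟨a, ha⟩ := h
  rcases ha with ⟨h1, -, h2⟩ | ⟨-, ⟨h1, -, h2⟩ | ⟨-, ⟨h1, -, h2⟩ | ⟨-, h1, -, h2⟩⟩⟩ <;>
    simp [h1.symm, h2.symm]

def pvAltLoop (picture : List (List Int)) (direction : String) (row col count : Int) : Int :=
  if 0 ≤ row ∧ row < (picture.length : Int) ∧ 0 ≤ col ∧ col < ((picture.headD []).length : Int) then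
    if ((PySem.List.pyGet? ((PySem.List.pyGet? picture row).getD []) col).getD 0) = 0 then count
    else
      match h : pvDeltas.get? direction with
      | none => count + 1  -- Python B returns None here; excluded by Pre_
      | some d => pvAltLoop picture direction (row + d.1) (col + d.2) (count + 1)
  else count
termination_by pvMeasure picture direction row col
decreasing_by
  all_goals rcases pvDeltas_cases _ _ h with ⟨h1, h2⟩ | ⟨h1, h2⟩ | ⟨h1, h2⟩ | ⟨h1, h2⟩
  all_goals subst h1
  all_goals subst h2
  all_goals simp_all [pvMeasure]

def directions_max_seen_cell_py_alt (picture : List (List Int)) (row : Int) (col : Int) (direction : String) (sum : Int) : Int :=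
  pvAltLoop picture direction row col sum

-- ===== PRECONDITION & SPEC =====
-- Pre_ excludes exactly the walks on which Python A raises IndexError (a ragged row reachable in
-- the walk's direction is shorter than picture[0]) or returns None (direction not one of the four
-- at an in-bounds non-zero start cell); the row-length conditions are per-direction and slightly
-- conservative (a walk stopped by a 0 before the short row is also excluded — see cites).
def Pre_directions_max_seen_cell_py (picture : List (List Int)) (row : Int) (col : Int) (direction : String) (sum : Int) : Prop :=
  (0 ≤ row ∧ row < (picture.length : Int) ∧ 0 ≤ col ∧ col < ((picture.headD []).length : Int)) →
    (col < (((PySem.List.pyGet? picture row).getD []).length : Int) ∧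
      (((PySem.List.pyGet? ((PySem.List.pyGet? picture row).getD []) col).getD 0) ≠ 0 →
        ((direction = "up" ∧ ∀ r ∈ picture.take (row.toNat + 1), col < (r.length : Int)) ∨
         (direction = "down" ∧ ∀ r ∈ picture.drop row.toNat, col < (r.length : Int)) ∨
         direction = "left" ∨
         (direction = "right" ∧
           ((picture.headD []).length : Int) ≤ (((PySem.List.pyGet? picture row).getD []).length : Int)))))
instance (picture : List (List Int)) (row : Int) (col : Int) (direction : String) (sum : Int) : Decidable (Pre_directions_max_seen_cell_py picture row col direction sum) := by unfold Pre_directions_max_seen_cell_py; infer_instance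

def pvWitness_directions_max_seen_cell_py : List (List Int) × Int × Int × String × Int :=
  ([[1, 1], [1, 1]], 0, 0, "right", 0)

def Spec_directions_max_seen_cell_py (picture : List (List Int)) (row : Int) (col : Int) (direction : String) (sum : Int) (out : Int) : Prop := out = directions_max_seen_cell_py_alt picture row col direction sum
instance (picture : List (List Int)) (row : Int) (col : Int) (direction : String) (sum : Int) (out : Int) : Decidable (Spec_directions_max_seen_cell_py picture row col direction sum out) := by unfold Spec_directions_max_seen_cell_py; infer_instance

-- ===== CLAIM (what is proved, stated in full; the proofs are below) =====
def Claim_equal_directions_max_seen_cell_py : Prop := ∀ (picture : List (List Int)) (row : Int) (col : Int) (direction : String) (sum : Int), Dom_directions_max_seen_cell_py picture row col direction sum → Pre_directions_max_seen_cell_py picture row col direction sum → Spec_directions_max_seen_cell_py picture row col direction sum (directions_max_seen_cell_py picture row col direction sum)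

-- ===== LEMMAS AND PROOFS =====

lemma pvLoop_eq (picture : List (List Int)) (row col : Int) (direction : String) (sum : Int) :
    (direction = "up" ∨ direction = "down" ∨ direction = "left" ∨ direction = "right") →
    directions_max_seen_cell_py picture row col direction sum = pvAltLoop picture direction row col sum := by
  fun_induction directions_max_seen_cell_py picture row col direction sum with
  | case1 row col direction sum h =>
    intro _; rw [pvAltLoop, if_neg (by omega)]
  | case2 row col direction sum h1 h2 =>
    intro _; rw [pvAltLoop, if_neg (by omega)]
  | case3 row col direction sum h1 h2 cell hc =>
    intro _; rw [pvAltLoop, if_pos (by omega), if_pos hc]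
  | case4 row col sum h1 h2 cell hc sum2 ih =>
    intro _
    rw [pvAltLoop, if_pos (by omega), if_neg hc]
    split
    · next heq => exact absurd heq (by decide)
    · next d heq =>
        have hd : d = ((-1 : Int), (0 : Int)) := by
          have hv : pvDeltas.get? "up" = some ((-1 : Int), (0 : Int)) := by decide
          rw [hv] at heq; exact (Option.some.inj heq).symm
        subst hd
        rw [ih (Or.inl rfl)]
        congr 1; omega
  | case5 row col sum h1 h2 cell hc sum2 hu ih =>
    intro _
    rw [pvAltLoop, if_pos (by omega), if_neg hc]
    split
    · next heq => exact absurd heq (by decide)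
    · next d heq =>
        have hd : d = ((1 : Int), (0 : Int)) := by
          have hv : pvDeltas.get? "down" = some ((1 : Int), (0 : Int)) := by decide
          rw [hv] at heq; exact (Option.some.inj heq).symm
        subst hd
        rw [ih (Or.inr (Or.inl rfl))]
        congr 1; omega
  | case6 row col sum h1 h2 cell hc sum2 hu hd ih =>
    intro _
    rw [pvAltLoop, if_pos (by omega), if_neg hc]
    split
    · next heq => exact absurd heq (by decide)
    · next d heq =>
        have hd : d = ((0 : Int), (-1 : Int)) := by
          have hv : pvDeltas.get? "left" = some ((0 : Int), (-1 : Int)) := by decide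
          rw [hv] at heq; exact (Option.some.inj heq).symm
        subst hd
        rw [ih (Or.inr (Or.inr (Or.inl rfl)))]
        congr 1; omega
  | case7 row col sum h1 h2 cell hc sum2 hu hd hl ih =>
    intro _
    rw [pvAltLoop, if_pos (by omega), if_neg hc]
    split
    · next heq => exact absurd heq (by decide)
    · next d heq =>
        have hd : d = ((0 : Int), (1 : Int)) := by
          have hv : pvDeltas.get? "right" = some ((0 : Int), (1 : Int)) := by decide
          rw [hv] at heq; exact (Option.some.inj heq).symm
        subst hd
        rw [ih (Or.inr (Or.inr (Or.inr rfl)))]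
        congr 1; omega
  | case8 a1 a2 a3 a4 a5 a6 a7 a8 hu hd hl hr =>
    intro hdir
    rcases hdir with h | h | h | h <;> simp_all

-- ===== VERDICT (by name: the statement is the Claim_ definition above) =====
theorem directions_max_seen_cell_py_spec : Claim_equal_directions_max_seen_cell_py := by
  intro picture row col direction sum _ hpre
  unfold Spec_directions_max_seen_cell_py directions_max_seen_cell_py_alt
  by_cases hb : (0 ≤ row ∧ row < (picture.length : Int) ∧ 0 ≤ col ∧ col < ((picture.headD []).length : Int))
  · obtain ⟨hlen, hcell⟩ := hpre hb
    by_cases hc : ((PySem.List.pyGet? ((PySem.List.pyGet? picture row).getD []) col).getD 0) = 0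
    · rw [directions_max_seen_cell_py, if_neg (by omega), if_neg (by omega), if_pos hc,
          pvAltLoop, if_pos hb, if_pos hc]
    · exact pvLoop_eq picture row col direction sum
        (by rcases hcell hc with ⟨h, -⟩ | ⟨h, -⟩ | h | ⟨h, -⟩ <;> simp [h])
  · rw [directions_max_seen_cell_py, pvAltLoop, if_neg hb]
    split_ifs <;> omega
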